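-- pv_equiv track=rewrite | github.com/s-knibbs/code-jam-solutions | falling_diamonds/falling_diamonds.py | calculate_target_permutations
-- ===== SOURCE A (Python) =====
-- import math
--
-- LEFT = 0
--
-- RIGHT = 1
--
-- def count_where(predicate, iterable):
--     """
--     Count the number of items in iterable that satisfy
--     the predicate
--     """
--     return sum(1 for x in iterable if predicate(x))
--
-- def multiset_permutations(word, alphabet=(LEFT, RIGHT)):
--     """
--     Calculates the number of permutations of the given multiset.
--     See https://en.wikipedia.org/wiki/Permutation#Permutations_of_multisets
--     """
--     factorial_counts = [
--         math.factorial(count_where(lambda x: x == symbol, word))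
--         for symbol in alphabet
--     ]
--     permutations = math.factorial(len(word))
--     for f in factorial_counts:
--         permutations //= f
--     return permutations
--
-- def calculate_target_permutations(pivot, n, target, total_permutations):
--     target_side, other_side = (LEFT, RIGHT) if target[0] < 0 else (RIGHT, LEFT)
--     s = target[1]
--     r = n - s
--     # Not enough diamonds to reach the target
--     if r < 0:
--         return 0
--     # Calculate permutations not containing the target
--     # and subtract from the total
--     invalid_permutations = 0
--     while r <= pivot and s >= 0:
--         target_word = [target_side] * s + [other_side] * r
--         invalid_permutations += multiset_permutations(target_word)
--         s -= 1
--         r += 1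
--     return total_permutations - invalid_permutations
-- ===== SOURCE B (Python) =====
-- import math
--
-- def calculate_target_permutations(pivot, n, target, total_permutations):
--     s = target[1]
--     r = n - s
--     if r < 0:
--         return 0
--     # Each invalid word has s target-side and r other-side symbols, so it
--     # contributes C(n, s) permutations; walk s down updating the binomial
--     # incrementally: C(n, s-1) = C(n, s) * s // (n - s + 1).
--     invalid = 0
--     c = math.comb(n, s) if s >= 0 else 0
--     while r <= pivot and s >= 0:
--         invalid += c
--         c = c * s // (n - s + 1)
--         s -= 1
--         r += 1
--     return total_permutations - invalid
-- ===== Notes on version B (the rewrite author's own statement) =====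
-- stated objective: alternative
-- what changed: Each loop iteration's multiset-permutation count (three factorials of an explicitly built length-n word plus two big divisions) is replaced by a single binomial C(n,s) computed once and updated incrementally via C(n,s-1) = C(n,s)*s//(n-s+1).
import Mathlib
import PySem

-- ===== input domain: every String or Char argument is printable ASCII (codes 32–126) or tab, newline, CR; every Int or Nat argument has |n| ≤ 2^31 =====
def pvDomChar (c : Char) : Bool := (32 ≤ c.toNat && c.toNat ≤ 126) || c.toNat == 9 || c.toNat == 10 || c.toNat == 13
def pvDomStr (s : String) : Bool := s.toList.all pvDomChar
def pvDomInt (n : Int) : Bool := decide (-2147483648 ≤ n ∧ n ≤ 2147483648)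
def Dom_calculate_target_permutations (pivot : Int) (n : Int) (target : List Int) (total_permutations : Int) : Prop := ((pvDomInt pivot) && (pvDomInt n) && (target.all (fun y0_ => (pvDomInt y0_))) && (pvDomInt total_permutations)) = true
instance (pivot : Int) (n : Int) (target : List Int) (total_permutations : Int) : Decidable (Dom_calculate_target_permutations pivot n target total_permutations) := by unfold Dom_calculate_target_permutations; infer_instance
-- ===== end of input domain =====

-- B replaces A's per-iteration factorial-based multiset count (built from an
-- explicit word list) by one binomial computed once and updated incrementally
-- via C(n,s-1) = C(n,s)*s // (n-s+1); objective: alternative algorithm.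

-- ===== PORT A =====
-- math.factorial; every call reached under Pre_ has a nonnegative argument, where toNat is exact
def pyFactorial (k : Int) : Int := (Nat.factorial k.toNat : Int)

-- sum(1 for x in iterable if predicate(x))
def count_where (p : Int → Bool) (w : List Int) : Int :=
  w.foldl (fun acc x => if p x then acc + 1 else acc) 0

def multiset_permutations (word : List Int) : Int :=
  let f0 := pyFactorial (count_where (fun x => x == (0 : Int)) word)
  let f1 := pyFactorial (count_where (fun x => x == (1 : Int)) word)
  let p := pyFactorial (word.length : Int)
  PySem.Int.floordiv (PySem.Int.floordiv p f0) f1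

-- the while loop of A; fuel (s+1).toNat bounds the iterations since s decreases and the loop needs 0 ≤ s
def loopA (pivot tside oside : Int) : Nat → Int → Int → Int → Int
  | 0, _, _, acc => acc
  | fuel + 1, s, r, acc =>
    if r ≤ pivot ∧ 0 ≤ s then
      loopA pivot tside oside fuel (s - 1) (r + 1)
        (acc + multiset_permutations (List.replicate s.toNat tside ++ List.replicate r.toNat oside))
    else acc

def calculate_target_permutations (pivot : Int) (n : Int) (target : List Int) (total_permutations : Int) : Int :=
  -- target[0] / target[1]: in range under Pre_ (IndexError excluded), so getD 0 is never the result
  let ts_os : Int × Int := if (PySem.List.pyGet? target 0).getD 0 < 0 then (0, 1) else (1, 0)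
  let s := (PySem.List.pyGet? target 1).getD 0
  let r := n - s
  if r < 0 then 0
  else total_permutations - loopA pivot ts_os.1 ts_os.2 (s + 1).toNat s r 0

-- ===== PORT B =====
-- math.comb; every call reached under Pre_ has 0 ≤ k ≤ n, where toNat is exact
def intComb (n k : Int) : Int := (Nat.choose n.toNat k.toNat : Int)

-- the while loop of B: state (s, r, c, invalid), same fuel bound as A's loop
def loopB (pivot n : Int) : Nat → Int → Int → Int → Int → Int
  | 0, _, _, _, acc => acc
  | fuel + 1, s, r, c, acc =>
    if r ≤ pivot ∧ 0 ≤ s then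
      loopB pivot n fuel (s - 1) (r + 1) (PySem.Int.floordiv (c * s) (n - s + 1)) (acc + c)
    else acc

def calculate_target_permutations_alt (pivot : Int) (n : Int) (target : List Int) (total_permutations : Int) : Int :=
  let s := (PySem.List.pyGet? target 1).getD 0
  let r := n - s
  if r < 0 then 0
  else total_permutations -
    loopB pivot n (s + 1).toNat s r (if 0 ≤ s then intComb n s else 0) 0

-- ===== PRECONDITION & SPEC =====
-- Pre_ excludes only target lists of length < 2, on which both Pythons raise IndexError.
def Pre_calculate_target_permutations (pivot : Int) (n : Int) (target : List Int) (total_permutations : Int) : Prop :=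
  2 ≤ target.length
instance (pivot : Int) (n : Int) (target : List Int) (total_permutations : Int) : Decidable (Pre_calculate_target_permutations pivot n target total_permutations) := by unfold Pre_calculate_target_permutations; infer_instance

def pvWitness_calculate_target_permutations : Int × Int × List Int × Int := (3, 4, [1, 2], 100)

def Spec_calculate_target_permutations (pivot : Int) (n : Int) (target : List Int) (total_permutations : Int) (out : Int) : Prop := out = calculate_target_permutations_alt pivot n target total_permutations
instance (pivot : Int) (n : Int) (target : List Int) (total_permutations : Int) (out : Int) : Decidable (Spec_calculate_target_permutations pivot n target total_permutations out) := by unfold Spec_calculate_target_permutations; infer_instance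

-- ===== CLAIM (what is proved, stated in full; the proofs are below) =====
def Claim_equal_calculate_target_permutations : Prop := ∀ (pivot : Int) (n : Int) (target : List Int) (total_permutations : Int), Dom_calculate_target_permutations pivot n target total_permutations → Pre_calculate_target_permutations pivot n target total_permutations → Spec_calculate_target_permutations pivot n target total_permutations (calculate_target_permutations pivot n target total_permutations)

-- ===== LEMMAS AND PROOFS =====

theorem count_where_eq (p : Int → Bool) (w : List Int) :
    count_where p w = (w.countP p : Int) := by
  have h : ∀ (w : List Int) (acc : Int),
      w.foldl (fun acc x => if p x then acc + 1 else acc) acc = acc + (w.countP p : Int) := by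
    intro w
    induction w with
    | nil => simp
    | cons a t ih =>
      intro acc
      by_cases hp : p a <;> simp [hp, ih] <;> ring
  simpa using h w 0

theorem countP_replicate_eq (p : Int → Bool) (a : Int) (m : Nat) :
    (List.replicate m a).countP p = if p a then m else 0 := by
  induction m with
  | zero => simp
  | succ k ih => by_cases hp : p a <;> simp [List.replicate_succ, hp, ih]

-- the multiset-permutation count of an s/r word is the binomial coefficient
theorem fact_div_div (a b : Nat) :
    (a + b).factorial / a.factorial / b.factorial = Nat.choose (a + b) a := by
  have hfact : Nat.choose (a + b) a * a.factorial * b.factorial = (a + b).factorial := by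
    have := Nat.choose_mul_factorial_mul_factorial (Nat.le_add_right a b)
    simpa [Nat.add_sub_cancel_left] using this
  rw [← hfact]
  rw [show Nat.choose (a + b) a * a.factorial * b.factorial
      = Nat.choose (a + b) a * b.factorial * a.factorial by ring]
  rw [Nat.mul_div_cancel _ (Nat.factorial_pos a), Nat.mul_div_cancel _ (Nat.factorial_pos b)]

theorem mp_eq_choose (s r : Nat) (t o : Int)
    (ho : (t = 0 ∧ o = 1) ∨ (t = 1 ∧ o = 0)) :
    multiset_permutations (List.replicate s t ++ List.replicate r o)
      = (Nat.choose (s + r) s : Int) := by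
  have hlen : ∀ (t o : Int), (List.replicate s t ++ List.replicate r o).length = s + r := by
    intro t o; simp
  rcases ho with ⟨ht, hw⟩ | ⟨ht, hw⟩ <;> subst ht <;> subst hw
  · have c0 : count_where (fun x => x == (0 : Int)) (List.replicate s (0:Int) ++ List.replicate r 1)
        = (s : Int) := by
      rw [count_where_eq, List.countP_append, countP_replicate_eq, countP_replicate_eq]; norm_num
    have c1 : count_where (fun x => x == (1 : Int)) (List.replicate s (0:Int) ++ List.replicate r 1)
        = (r : Int) := by
      rw [count_where_eq, List.countP_append, countP_replicate_eq, countP_replicate_eq]; norm_num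
    simp only [multiset_permutations, c0, c1, hlen, pyFactorial, Int.toNat_natCast,
      PySem.Int.floordiv_natCast]
    rw [fact_div_div]
  · have c0 : count_where (fun x => x == (0 : Int)) (List.replicate s (1:Int) ++ List.replicate r 0)
        = (r : Int) := by
      rw [count_where_eq, List.countP_append, countP_replicate_eq, countP_replicate_eq]; norm_num
    have c1 : count_where (fun x => x == (1 : Int)) (List.replicate s (1:Int) ++ List.replicate r 0)
        = (s : Int) := by
      rw [count_where_eq, List.countP_append, countP_replicate_eq, countP_replicate_eq]; norm_num
    simp only [multiset_permutations, c0, c1, hlen, pyFactorial, Int.toNat_natCast,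
      PySem.Int.floordiv_natCast]
    have h := fact_div_div r s
    rw [Nat.add_comm r s] at h
    rw [h]
    have hsymm := Nat.choose_symm (Nat.le_add_left r s)
    rw [Nat.add_sub_cancel] at hsymm
    rw [← hsymm]

-- the binomial recurrence C(n,s-1) = C(n,s)*s // (n-s+1) in Int, div exact
theorem comb_step (n s : Int) (h0 : 0 ≤ s) (hsn : s ≤ n) :
    PySem.Int.floordiv (intComb n s * s) (n - s + 1)
      = if 0 ≤ s - 1 then intComb n (s - 1) else 0 := by
  have hpos : 0 < n - s + 1 := by omega
  rw [PySem.Int.floordiv_eq_ediv_of_pos hpos]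
  by_cases hs1 : 1 ≤ s
  · rw [if_pos (by omega : (0:Int) ≤ s - 1)]
    have hid : Nat.choose n.toNat s.toNat * s.toNat
        = Nat.choose n.toNat (s.toNat - 1) * (n.toNat - (s.toNat - 1)) := by
      have hk : s.toNat = (s.toNat - 1) + 1 := by omega
      calc Nat.choose n.toNat s.toNat * s.toNat
          = Nat.choose n.toNat ((s.toNat - 1) + 1) * ((s.toNat - 1) + 1) := by rw [← hk]
        _ = Nat.choose n.toNat (s.toNat - 1) * (n.toNat - (s.toNat - 1)) :=
            Nat.choose_succ_right_eq n.toNat (s.toNat - 1)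
    have hcast : intComb n s * s = intComb n (s - 1) * (n - s + 1) := by
      have l1 : intComb n s * s = ((Nat.choose n.toNat s.toNat * s.toNat : Nat) : Int) := by
        simp only [intComb, Nat.cast_mul]
        congr 1
        omega
      have l2 : ((Nat.choose n.toNat (s.toNat - 1) * (n.toNat - (s.toNat - 1)) : Nat) : Int)
          = intComb n (s - 1) * (n - s + 1) := by
        have hst : (s - 1).toNat = s.toNat - 1 := by omega
        simp only [intComb, Nat.cast_mul, hst]
        congr 1
        omega
      rw [l1, hid, l2]
    rw [hcast, Int.mul_ediv_cancel _ (by omega : n - s + 1 ≠ 0)]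
  · have hs0 : s = 0 := by omega
    subst hs0
    simp

-- A's loop and B's loop agree when c carries the current binomial
theorem loop_eq (pivot t o : Int) (ho : (t = 0 ∧ o = 1) ∨ (t = 1 ∧ o = 0)) (n : Int) :
    ∀ (fuel : Nat) (s r acc : Int), s + r = n → 0 ≤ r →
      loopA pivot t o fuel s r acc
        = loopB pivot n fuel s r (if 0 ≤ s then intComb n s else 0) acc := by
  intro fuel
  induction fuel with
  | zero => intro s r acc _ _; rfl
  | succ k ih =>
    intro s r acc hsum hr
    by_cases hc : r ≤ pivot ∧ 0 ≤ s
    · have hs : 0 ≤ s := hc.2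
      have hsn : s ≤ n := by omega
      have hadd : multiset_permutations (List.replicate s.toNat t ++ List.replicate r.toNat o)
          = intComb n s := by
        have := mp_eq_choose s.toNat r.toNat t o ho
        have hnn : (s.toNat + r.toNat) = n.toNat := by omega
        rw [this, hnn]; rfl
      rw [loopA, loopB, if_pos hc, if_pos hc, if_pos hs, hadd,
        comb_step n s hs hsn, ih (s - 1) (r + 1) (acc + intComb n s) (by omega) (by omega)]
    · rw [loopA, loopB, if_neg hc, if_neg hc]

-- ===== VERDICT (by name: the statement is the Claim_ definition above) =====
theorem calculate_target_permutations_spec : Claim_equal_calculate_target_permutations := by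
  intro pivot n target total _ hpre
  unfold Spec_calculate_target_permutations
  unfold Pre_calculate_target_permutations at hpre
  obtain ⟨a0, target, h2⟩ : ∃ a0 rest, target = a0 :: rest := by
    cases target with
    | nil => simp at hpre
    | cons a t => exact ⟨a, t, rfl⟩
  obtain ⟨a1, rest, h3⟩ : ∃ a1 rest, target = a1 :: rest := by
    cases target with
    | nil => simp [h2] at hpre
    | cons a t => exact ⟨a, t, rfl⟩
  subst h3; subst h2
  unfold calculate_target_permutations calculate_target_permutations_alt
  have hx : (0:Int) ≤ (rest.length : Int) + 1 := by positivity
  simp [PySem.List.pyGet?, PySem.List.pyIdx?, hx]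
  by_cases hr : n < a1
  · simp [hr]
  · simp only [hr, if_false]
    by_cases hneg : a0 < 0
    · simp only [hneg, if_true]
      rw [loop_eq pivot 0 1 (Or.inl ⟨rfl, rfl⟩) n (a1 + 1).toNat a1 (n - a1) 0 (by omega) (by omega)]
    · simp only [hneg, if_false]
      rw [loop_eq pivot 1 0 (Or.inr ⟨rfl, rfl⟩) n (a1 + 1).toNat a1 (n - a1) 0 (by omega) (by omega)]
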